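-- pv_equiv track=rewrite | github.com/overkillkulture/toasted-ai | MaatAI_GODCODE/platform_backup.py | _generate_perspectives
-- ===== SOURCE A (Python) =====
-- from typing import Dict, List, Any, Optional, Callable
--
-- def _generate_perspectives(input_text: str, count: int) -> List[str]:
--     """Generate different perspectives on the input"""
--
--     perspective_templates = [
--         "Analyze from the perspective of truth and accuracy: {}",
--         "Consider the balance and stability implications: {}",
--         "Examine the order and structure: {}",
--         "Evaluate justice and fairness: {}",
--         "Think about harmony and integration: {}",
--         "From a technical/engineering viewpoint: {}",
--         "From an ethical standpoint: {}",
--         "Consider the long-term consequences: {}",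
--         "Think about the systemic impact: {}",
--         "From the user's direct needs: {}",
--         "Consider alternative approaches: {}",
--         "Identify potential risks and threats: {}",
--         "Look for opportunities and strengths: {}",
--         "Examine the root causes: {}",
--         "Think about complementary perspectives: {}",
--         "Consider historical context: {}",
--         "Evaluate practical feasibility: {}",
--         "Assess resource requirements: {}",
--         "Think about failure modes: {}",
--         "Consider success metrics: {}",
--     ]
--
--     perspectives = []
--     for i in range(count):
--         template = perspective_templates[i % len(perspective_templates)]
--         perspectives.append(template.format(input_text))
--
--     return perspectives
-- ===== SOURCE B (Python) =====
-- def _generate_perspectives(input_text: str, count: int):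
--     """Generate different perspectives on the input"""
--
--     perspective_templates = [
--         "Analyze from the perspective of truth and accuracy: {}",
--         "Consider the balance and stability implications: {}",
--         "Examine the order and structure: {}",
--         "Evaluate justice and fairness: {}",
--         "Think about harmony and integration: {}",
--         "From a technical/engineering viewpoint: {}",
--         "From an ethical standpoint: {}",
--         "Consider the long-term consequences: {}",
--         "Think about the systemic impact: {}",
--         "From the user's direct needs: {}",
--         "Consider alternative approaches: {}",
--         "Identify potential risks and threats: {}",
--         "Look for opportunities and strengths: {}",
--         "Examine the root causes: {}",
--         "Think about complementary perspectives: {}",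
--         "Consider historical context: {}",
--         "Evaluate practical feasibility: {}",
--         "Assess resource requirements: {}",
--         "Think about failure modes: {}",
--         "Consider success metrics: {}",
--     ]
--
--     # Format each of the 20 templates exactly once, then tile and truncate.
--     formatted = [t.format(input_text) for t in perspective_templates]
--     return (formatted * (count // len(perspective_templates) + 1))[:count]
-- ===== Notes on version B (the rewrite author's own statement) =====
-- stated objective: alternative
-- what changed: Each of the 20 templates is formatted exactly once, then the result is built by tiling that list count//20+1 times and slicing to count, instead of formatting per index with a modulo lookup in a loop.
import Mathlib
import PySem

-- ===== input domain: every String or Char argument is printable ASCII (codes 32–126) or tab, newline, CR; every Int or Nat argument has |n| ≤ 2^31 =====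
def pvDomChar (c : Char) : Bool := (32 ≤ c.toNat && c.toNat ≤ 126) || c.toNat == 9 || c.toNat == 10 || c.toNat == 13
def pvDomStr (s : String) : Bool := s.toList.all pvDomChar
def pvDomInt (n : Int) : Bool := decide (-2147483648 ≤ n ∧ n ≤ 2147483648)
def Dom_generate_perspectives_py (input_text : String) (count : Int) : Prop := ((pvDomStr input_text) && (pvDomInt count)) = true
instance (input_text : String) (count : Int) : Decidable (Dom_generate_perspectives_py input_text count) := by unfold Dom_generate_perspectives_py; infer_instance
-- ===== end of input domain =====

-- B formats each of the 20 templates once, then tiles that list count//20+1 times and slices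
-- to count, replacing A's per-index modulo-and-format loop (objective: alternative decomposition).


-- ===== PORT A =====
-- the literal template list of both Pythons
def pvTemplates : List String := [
  "Analyze from the perspective of truth and accuracy: {}",
  "Consider the balance and stability implications: {}",
  "Examine the order and structure: {}",
  "Evaluate justice and fairness: {}",
  "Think about harmony and integration: {}",
  "From a technical/engineering viewpoint: {}",
  "From an ethical standpoint: {}",
  "Consider the long-term consequences: {}",
  "Think about the systemic impact: {}",
  "From the user's direct needs: {}",
  "Consider alternative approaches: {}",
  "Identify potential risks and threats: {}",
  "Look for opportunities and strengths: {}",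
  "Examine the root causes: {}",
  "Think about complementary perspectives: {}",
  "Consider historical context: {}",
  "Evaluate practical feasibility: {}",
  "Assess resource requirements: {}",
  "Think about failure modes: {}",
  "Consider success metrics: {}"]

-- template.format(input_text): each template contains exactly one "{}" and no other braces,
-- so .format is exactly replacing that "{}" — exact via PySem.Str.replace.
def pvFormat (template input_text : String) : String :=
  PySem.Str.replace template "{}" input_text

-- A: for i in range(count): append templates[i % len(templates)].format(input_text)
def generate_perspectives_py (input_text : String) (count : Int) : List String :=
  (PySem.List.pyRange 0 count 1).foldl
    (fun perspectives i =>
      perspectives ++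
        [pvFormat (PySem.List.pyGetD pvTemplates (PySem.Int.mod i (PySem.List.len pvTemplates)) "")
          input_text])
    []

-- ===== PORT B =====
-- B: formatted = [t.format(input_text) for t in templates]; (formatted * (count//20 + 1))[:count]
def generate_perspectives_py_alt (input_text : String) (count : Int) : List String :=
  let formatted := pvTemplates.map (fun t => pvFormat t input_text)
  PySem.List.slice
    (PySem.List.pyRepeat formatted
      (PySem.Int.floordiv count (PySem.List.len pvTemplates) + 1))
    none (some count)

-- ===== PRECONDITION & SPEC =====
def Spec_generate_perspectives_py (input_text : String) (count : Int) (out : List String) : Prop := out = generate_perspectives_py_alt input_text count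
instance (input_text : String) (count : Int) (out : List String) : Decidable (Spec_generate_perspectives_py input_text count out) := by unfold Spec_generate_perspectives_py; infer_instance

-- ===== CLAIM (what is proved, stated in full; the proofs are below) =====
def Claim_equal_generate_perspectives_py : Prop := ∀ (input_text : String) (count : Int), Dom_generate_perspectives_py input_text count → Spec_generate_perspectives_py input_text count (generate_perspectives_py input_text count)

-- ===== LEMMAS AND PROOFS =====

-- indexing into a tiled list is indexing modulo the tile length
lemma flatten_replicate_getElem? {α : Type} (xs : List α) (r k : Nat)
    (hk : k < r * xs.length) :
    (List.replicate r xs).flatten[k]? = xs[k % xs.length]? := by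
  induction r generalizing k with
  | zero => omega
  | succ r ih =>
    rw [List.replicate_succ, List.flatten_cons]
    rw [Nat.succ_mul] at hk
    by_cases h : k < xs.length
    · rw [List.getElem?_append_left h, Nat.mod_eq_of_lt h]
    · rw [List.getElem?_append_right (by omega), ih _ (by omega),
        ← Nat.mod_eq_sub_mod (by omega)]

lemma alt_pos (input_text : String) (n : Nat) :
    generate_perspectives_py_alt input_text (n : Int) =
      (List.range n).map
        (fun k => pvFormat (pvTemplates.getD (k % 20) "") input_text) := by
  unfold generate_perspectives_py_alt
  have hlen : PySem.List.len pvTemplates = ((20 : Nat) : Int) := by decide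
  rw [hlen, PySem.Int.floordiv_natCast]
  have hrep : (((n / 20 : Nat) : Int) + 1) = (((n / 20 + 1 : Nat)) : Int) := by push_cast; ring
  rw [hrep]
  show PySem.List.slice ((List.replicate ((((n / 20 + 1 : Nat)) : Int)).toNat _).flatten) none (some (n : Int)) = _
  rw [Int.toNat_natCast, PySem.List.slice_to_natCast]
  set f : String → String := fun t => pvFormat t input_text with hf
  have hlen20 : (pvTemplates.map f).length = 20 := by simp [pvTemplates]
  apply List.ext_getElem?
  intro k
  by_cases hk : k < n
  · have hkb : k < (n / 20 + 1) * (pvTemplates.map f).length := by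
      rw [hlen20]; have := Nat.div_add_mod n 20; have := Nat.mod_lt n (show 0 < 20 by omega); omega
    rw [List.getElem?_take_of_lt hk, flatten_replicate_getElem? _ _ _ hkb, hlen20,
      List.getElem?_map, List.getElem?_map, List.getElem?_range hk]
    have hm : k % 20 < pvTemplates.length := by
      have := Nat.mod_lt k (show 0 < 20 by omega); simp [pvTemplates]; omega
    rw [List.getElem?_eq_getElem hm]
    simp [hf]
    rw [List.getElem?_eq_getElem hm]
    rfl
  · push Not at hk
    rw [List.getElem?_eq_none, List.getElem?_eq_none]
    · simpa using hk
    · have h1 : (List.replicate (n / 20 + 1) (pvTemplates.map f)).flatten.length = (n / 20 + 1) * 20 := by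
        simp [List.length_flatten, hlen20, Nat.mul_comm]
      rw [List.length_take, h1]; omega

lemma a_pos (input_text : String) (n : Nat) :
    generate_perspectives_py input_text (n : Int) =
      (List.range n).map
        (fun k => pvFormat (pvTemplates.getD (k % 20) "") input_text) := by
  unfold generate_perspectives_py
  rw [PySem.List.foldl_append_singleton_eq_map, PySem.List.pyRange_one]
  simp only [sub_zero, Int.toNat_natCast, List.map_map]
  apply List.map_congr_left
  intro k _
  simp only [Function.comp, zero_add]
  have hlen : PySem.List.len pvTemplates = (20 : Int) := by decide
  rw [hlen]
  have hmod : PySem.Int.mod ((k : Nat) : Int) 20 = (((k % 20 : Nat)) : Int) := by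
    rw [PySem.Int.mod_eq_emod_of_pos (by omega : (0:Int) < 20)]
    omega
  rw [hmod, PySem.List.pyGetD_natCast]

theorem generate_perspectives_both_nonpos (input_text : String) (count : Int)
    (hc : count ≤ 0) :
    generate_perspectives_py input_text count = [] ∧
      generate_perspectives_py_alt input_text count = [] := by
  constructor
  · unfold generate_perspectives_py
    rw [PySem.List.pyRange_one_eq_nil hc]
    rfl
  · unfold generate_perspectives_py_alt
    have hlen : PySem.List.len pvTemplates = (20 : Int) := by decide
    rw [hlen]
    rcases (show count = 0 ∨ count < 0 by omega) with h0 | hneg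
    · subst h0
      show PySem.List.slice _ none (some (0 : Int)) = []
      rw [PySem.List.slice_to _ (le_refl 0)]
      simp
    · have hfd : PySem.Int.floordiv count 20 + 1 ≤ 0 := by
        have h : PySem.Int.floordiv count 20 < 0 :=
          (PySem.Int.floordiv_lt_iff_lt_mul (by omega : (0:Int) < 20)).mpr (by omega)
        omega
      have : (PySem.Int.floordiv count 20 + 1).toNat = 0 := Int.toNat_of_nonpos hfd
      show PySem.List.slice ((List.replicate (PySem.Int.floordiv count 20 + 1).toNat _).flatten) none (some count) = []
      rw [this]
      simp [PySem.List.slice]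

-- ===== VERDICT (by name: the statement is the Claim_ definition above) =====
theorem generate_perspectives_py_spec : Claim_equal_generate_perspectives_py := by
  intro input_text count _
  unfold Spec_generate_perspectives_py
  rcases le_or_gt count 0 with hc | hc
  · have h := generate_perspectives_both_nonpos input_text count hc
    rw [h.1, h.2]
  · obtain ⟨n, rfl⟩ : ∃ n : Nat, count = (n : Int) := ⟨count.toNat, by omega⟩
    rw [a_pos, alt_pos]
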